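-- pv_equiv track=rewrite | github.com/Rwik2000/rwik2000_website | resume/build_and_compile.py | build_achievements_tex
-- ===== SOURCE A (Python) =====
-- LATEX_ESC_EDU = [
--     ("&",  r"\&"), ("%", r"\%"), ("$", r"\$"), ("#", r"\#"), ("_", r"\_"),
--     ("~", r"\textasciitilde{}"), ("^", r"\textasciicircum{}"),
-- ]
--
-- def esc_edu(s:str)->str:
--     s = (s or "").strip()
--     for a,b in LATEX_ESC_EDU: s = s.replace(a,b)
--     return s
--
-- def build_achievements_tex(items):
--     lines = [
--         r"% AUTO-GENERATED — do not edit manually",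
--         r"\noindent {\large \bf ACHIEVEMENTS} \\[-5pt]",
--         r"\rule{\textwidth}{1.5pt}\\",
--         r"\vspace{-12pt}",
--         # r"",
--         r"\begin{enumerate}",
--         r"    \itemsep-0.3em",
--     ]
--     for txt in items:
--         lines.append(f"    \\item {esc_edu(txt)}")
--     lines += [r"\end{enumerate}", ""]
--     return "\n".join(lines)
-- ===== SOURCE B (Python) =====
-- _ESC = {
--     "&": r"\&", "%": r"\%", "$": r"\$", "#": r"\#", "_": r"\_",
--     "~": r"\textasciitilde{}", "^": r"\textasciicircum{}",
-- }
--
-- _HEADER = (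
--     "% AUTO-GENERATED \u2014 do not edit manually\n"
--     "\\noindent {\\large \\bf ACHIEVEMENTS} \\\\[-5pt]\n"
--     "\\rule{\\textwidth}{1.5pt}\\\\\n"
--     "\\vspace{-12pt}\n"
--     "\\begin{enumerate}\n"
--     "    \\itemsep-0.3em\n"
-- )
--
-- def _esc(s):
--     return "".join(_ESC.get(c, c) for c in s.strip())
--
-- def build_achievements_tex(items):
--     body = "".join("    \\item " + _esc(t) + "\n" for t in items)
--     return _HEADER + body + "\\end{enumerate}\n"
-- ===== Notes on version B (the rewrite author's own statement) =====
-- stated objective: idiomatic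
-- what changed: esc_edu's seven sequential full-string .replace passes are replaced by a single pass over the characters with a lookup table, and the output is built by direct string concatenation of a constant header, per-item lines and the footer instead of accumulating a list of lines and joining it.
import Mathlib
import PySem

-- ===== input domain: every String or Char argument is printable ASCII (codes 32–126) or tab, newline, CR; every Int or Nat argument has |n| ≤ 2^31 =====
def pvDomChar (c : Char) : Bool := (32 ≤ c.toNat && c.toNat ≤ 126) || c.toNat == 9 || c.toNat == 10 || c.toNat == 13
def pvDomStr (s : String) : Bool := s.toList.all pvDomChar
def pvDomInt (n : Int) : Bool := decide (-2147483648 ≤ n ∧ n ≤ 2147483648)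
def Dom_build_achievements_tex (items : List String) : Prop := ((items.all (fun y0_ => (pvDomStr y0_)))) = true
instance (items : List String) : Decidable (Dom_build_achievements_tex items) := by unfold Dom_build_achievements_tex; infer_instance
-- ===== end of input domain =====

-- B replaces esc_edu's seven sequential full-string .replace passes by one single pass with a
-- per-character lookup table, and builds the output by direct concatenation instead of a joined
-- list of lines (objective: idiomatic / alternative; return value only, no mutation involved).

-- ===== PORT A =====
def LATEX_ESC_EDU : List (String × String) :=
  [("&", "\\&"), ("%", "\\%"), ("$", "\\$"), ("#", "\\#"), ("_", "\\_"),
   ("~", "\\textasciitilde{}"), ("^", "\\textasciicircum{}")]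

def esc_edu (s : String) : String :=
  -- `(s or "")`: a str is falsy exactly when it is empty, so this keeps s (exact)
  let s0 := PySem.Str.strip (if s = "" then "" else s)
  LATEX_ESC_EDU.foldl (fun t p => PySem.Str.replace t p.1 p.2) s0

def build_achievements_tex (items : List String) : String :=
  -- lines = the six header lines, then the foldl appends one "    \item …" line per item,
  -- then lines += [r"\end{enumerate}", ""] and "\n".join(lines)
  PySem.Str.join "\n"
    ((items.foldl (fun acc txt => acc ++ ["    \\item " ++ esc_edu txt])
      ["% AUTO-GENERATED — do not edit manually",
       "\\noindent {\\large \\bf ACHIEVEMENTS} \\\\[-5pt]",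
       "\\rule{\\textwidth}{1.5pt}\\\\",
       "\\vspace{-12pt}",
       "\\begin{enumerate}",
       "    \\itemsep-0.3em"]) ++ ["\\end{enumerate}", ""])

-- ===== PORT B =====
-- the lookup table _ESC.get(c, c), as a function on characters
def escGet (c : Char) : List Char :=
  if c = '&' then "\\&".toList
  else if c = '%' then "\\%".toList
  else if c = '$' then "\\$".toList
  else if c = '#' then "\\#".toList
  else if c = '_' then "\\_".toList
  else if c = '~' then "\\textasciitilde{}".toList
  else if c = '^' then "\\textasciicircum{}".toList
  else [c]

def HEADER_B : List Char :=
  ("% AUTO-GENERATED — do not edit manually\n\\noindent {\\large \\bf ACHIEVEMENTS} \\\\[-5pt]\n\\rule{\\textwidth}{1.5pt}\\\\\n\\vspace{-12pt}\n\\begin{enumerate}\n    \\itemsep-0.3em\n").toList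

def esc_alt (s : String) : List Char :=
  (PySem.Chars.strip s.toList).flatMap escGet

def build_achievements_tex_alt (items : List String) : String :=
  String.ofList (HEADER_B
    ++ items.flatMap (fun t => "    \\item ".toList ++ esc_alt t ++ ['\n'])
    ++ "\\end{enumerate}\n".toList)

-- ===== PRECONDITION & SPEC =====
def Spec_build_achievements_tex (items : List String) (out : String) : Prop := out = build_achievements_tex_alt items
instance (items : List String) (out : String) : Decidable (Spec_build_achievements_tex items out) := by unfold Spec_build_achievements_tex; infer_instance

-- ===== CLAIM (what is proved, stated in full; the proofs are below) =====
def Claim_equal_build_achievements_tex : Prop := ∀ (items : List String), Dom_build_achievements_tex items → Spec_build_achievements_tex items (build_achievements_tex items)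

-- ===== LEMMAS AND PROOFS =====

-- single-character replacement is a per-character flatMap
lemma replace_go_single (a : Char) (new : List Char) :
    ∀ (fuel : Nat) (l acc : List Char), l.length ≤ fuel →
      PySem.Chars.replace.go [a] new fuel l acc
        = acc.reverse ++ l.flatMap (fun c => if c = a then new else [c]) := by
  intro fuel
  induction fuel with
  | zero => intro l acc h; cases l with
      | nil => simp [PySem.Chars.replace.go]
      | cons c t => simp at h
  | succ n ih =>
      intro l acc h
      cases l with
      | nil => simp [PySem.Chars.replace.go]
      | cons c t =>
        by_cases hca : c = a
        · subst hca
          have hp : List.isPrefixOf [c] (c :: t) = true := by simp [List.isPrefixOf]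
          rw [PySem.Chars.replace.go, if_pos hp]
          simp only [List.length_cons] at h
          rw [ih _ _ (by simpa using Nat.le_of_succ_le_succ h)]
          simp
        · have hp : List.isPrefixOf [a] (c :: t) = false := by
            simp [List.isPrefixOf]
            intro hc; exact absurd hc.symm hca
          rw [PySem.Chars.replace.go, if_neg (by simp [hp])]
          simp only [List.length_cons] at h
          rw [ih _ _ (Nat.le_of_succ_le_succ h)]
          simp [hca]

lemma replace_single (a : Char) (new l : List Char) :
    PySem.Chars.replace l [a] new = l.flatMap (fun c => if c = a then new else [c]) := by
  rw [PySem.Chars.replace]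
  simp only [List.isEmpty_cons, Bool.false_eq_true, if_false]
  exact replace_go_single a new l.length l [] (le_refl _)

-- the seven per-character replacement maps, named, and their left-nested composition
def E1 (c : Char) : List Char := if c = '&' then "\\&".toList else [c]
def E2 (c : Char) : List Char := if c = '%' then "\\%".toList else [c]
def E3 (c : Char) : List Char := if c = '$' then "\\$".toList else [c]
def E4 (c : Char) : List Char := if c = '#' then "\\#".toList else [c]
def E5 (c : Char) : List Char := if c = '_' then "\\_".toList else [c]
def E6 (c : Char) : List Char := if c = '~' then "\\textasciitilde{}".toList else [c]
def E7 (c : Char) : List Char := if c = '^' then "\\textasciicircum{}".toList else [c]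
def C7 (c : Char) : List Char :=
  ((((((E1 c).flatMap E2).flatMap E3).flatMap E4).flatMap E5).flatMap E6).flatMap E7

lemma flatMap_seven (l : List Char) :
    ((((((l.flatMap E1).flatMap E2).flatMap E3).flatMap E4).flatMap E5).flatMap E6).flatMap E7
      = l.flatMap C7 := by
  simp only [List.flatMap_assoc]
  congr 1
  funext c
  simp only [C7, List.flatMap_assoc]

-- no replacement string contains a later-escaped character, so the composition is the table lookup
lemma C7_eq_escGet : C7 = escGet := by
  funext c
  by_cases h1 : c = '&'; · subst h1; decide
  by_cases h2 : c = '%'; · subst h2; decide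
  by_cases h3 : c = '$'; · subst h3; decide
  by_cases h4 : c = '#'; · subst h4; decide
  by_cases h5 : c = '_'; · subst h5; decide
  by_cases h6 : c = '~'; · subst h6; decide
  by_cases h7 : c = '^'; · subst h7; decide
  simp [C7, E1, E2, E3, E4, E5, E6, E7, escGet, h1, h2, h3, h4, h5, h6, h7]

lemma esc_edu_toList (s : String) : (esc_edu s).toList = esc_alt s := by
  unfold esc_edu esc_alt
  have hs : (if s = "" then "" else s) = s := by split <;> simp_all
  rw [hs]
  simp only [LATEX_ESC_EDU, List.foldl_cons, List.foldl_nil]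
  simp only [PySem.Str.toList_replace, PySem.Str.toList_strip]
  rw [show ("&" : String).toList = ['&'] from rfl, show ("%" : String).toList = ['%'] from rfl,
      show ("$" : String).toList = ['$'] from rfl, show ("#" : String).toList = ['#'] from rfl,
      show ("_" : String).toList = ['_'] from rfl, show ("~" : String).toList = ['~'] from rfl,
      show ("^" : String).toList = ['^'] from rfl]
  simp only [replace_single]
  rw [show ∀ l : List Char,
        (l.flatMap fun c => if c = '&' then "\\&".toList else [c]) = l.flatMap E1 from fun _ => rfl]
  rw [show ∀ l : List Char,
        (l.flatMap fun c => if c = '%' then "\\%".toList else [c]) = l.flatMap E2 from fun _ => rfl]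
  rw [show ∀ l : List Char,
        (l.flatMap fun c => if c = '$' then "\\$".toList else [c]) = l.flatMap E3 from fun _ => rfl]
  rw [show ∀ l : List Char,
        (l.flatMap fun c => if c = '#' then "\\#".toList else [c]) = l.flatMap E4 from fun _ => rfl]
  rw [show ∀ l : List Char,
        (l.flatMap fun c => if c = '_' then "\\_".toList else [c]) = l.flatMap E5 from fun _ => rfl]
  rw [show ∀ l : List Char,
        (l.flatMap fun c => if c = '~' then "\\textasciitilde{}".toList else [c]) = l.flatMap E6 from fun _ => rfl]
  rw [show ∀ l : List Char,
        (l.flatMap fun c => if c = '^' then "\\textasciicircum{}".toList else [c]) = l.flatMap E7 from fun _ => rfl]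
  rw [flatMap_seven, C7_eq_escGet]

-- joining with "\n" splits over a prefix of whole lines
lemma join_nl (L : List (List Char)) (b : List Char) (bs : List (List Char)) :
    PySem.Chars.join ['\n'] (L ++ b :: bs)
      = L.flatMap (fun l => l ++ ['\n']) ++ PySem.Chars.join ['\n'] (b :: bs) := by
  induction L with
  | nil => simp
  | cons a L ih =>
      rcases e : L ++ b :: bs with _ | ⟨y, rest⟩
      · rcases L <;> simp_all
      · rw [List.cons_append, e, PySem.Chars.join_cons_cons, ← e, ih]
        simp

-- ===== VERDICT (by name: the statement is the Claim_ definition above) =====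
set_option maxRecDepth 40000 in
set_option maxHeartbeats 1000000 in
theorem build_achievements_tex_spec : Claim_equal_build_achievements_tex := by
  intro items _
  unfold Spec_build_achievements_tex build_achievements_tex build_achievements_tex_alt
  apply String.toList_inj.mp
  rw [PySem.List.foldl_append_singleton_eq_map, PySem.Str.toList_join,
      show ("\n" : String).toList = ['\n'] from rfl]
  simp only [List.map_append, List.map_cons, List.map_nil, List.map_map]
  rw [join_nl]
  simp only [List.flatMap_append, List.flatMap_cons, List.flatMap_nil, List.flatMap_map,
    List.append_nil, Function.comp]
  rw [PySem.Chars.join_cons_cons, PySem.Chars.join_singleton]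
  simp only [String.toList_append, esc_edu_toList, List.append_assoc]
  conv_rhs => rw [String.toList_ofList]
  generalize (items.flatMap fun a => "    \\item ".toList ++ (esc_alt a ++ ['\n'])) = X
  rw [show ("\\end{enumerate}".toList ++ (['\n'] ++ "".toList) : List Char)
        = "\\end{enumerate}\n".toList from by decide]
  rw [show (HEADER_B : List Char)
        = "% AUTO-GENERATED — do not edit manually".toList ++ (['\n'] ++
          ("\\noindent {\\large \\bf ACHIEVEMENTS} \\\\[-5pt]".toList ++ (['\n'] ++
          ("\\rule{\\textwidth}{1.5pt}\\\\".toList ++ (['\n'] ++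
          ("\\vspace{-12pt}".toList ++ (['\n'] ++
          ("\\begin{enumerate}".toList ++ (['\n'] ++
          ("    \\itemsep-0.3em".toList ++ ['\n'])))))))))) from by decide]
  simp only [List.append_assoc]
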